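-- pv_equiv track=rewrite | github.com/wesleyd/aoc16 | day17b.py | pos
-- ===== SOURCE A (Python) =====
-- def pos(s):
--     """Returns true if all positions s traverses are valid."""
--     row, col = 0, 0
--     for c in s:
--         match c:
--             case 'U':
--                 row -= 1
--             case 'D':
--                 row += 1
--             case 'L':
--                 col -= 1
--             case 'R':
--                 col += 1
--         if row < 0 or 4 <= row:
--             return None
--         if col < 0 or 4 <= col:
--             return None
--     return (row, col)
-- ===== SOURCE B (Python) =====
-- def pos(s):
--     """Returns the final position if all positions s traverses are valid."""
--     DELTA = {'U': (-1, 0), 'D': (1, 0), 'L': (0, -1), 'R': (0, 1)}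
--     pts = [(0, 0)]
--     for c in s:
--         dr, dc = DELTA.get(c, (0, 0))
--         pts.append((pts[-1][0] + dr, pts[-1][1] + dc))
--     if all(0 <= r < 4 and 0 <= c < 4 for r, c in pts):
--         return pts[-1]
--     return None
-- ===== Notes on version B (the rewrite author's own statement) =====
-- stated objective: alternative
-- what changed: B separates position generation from validation: it builds the full list of visited positions via a delta table (unknown characters map to (0,0), mirroring the match's silent no-op), then validates all of them in one scan and returns the last, instead of A's single loop that updates row/col and bounds-checks after every step with early return.
import Mathlib
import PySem

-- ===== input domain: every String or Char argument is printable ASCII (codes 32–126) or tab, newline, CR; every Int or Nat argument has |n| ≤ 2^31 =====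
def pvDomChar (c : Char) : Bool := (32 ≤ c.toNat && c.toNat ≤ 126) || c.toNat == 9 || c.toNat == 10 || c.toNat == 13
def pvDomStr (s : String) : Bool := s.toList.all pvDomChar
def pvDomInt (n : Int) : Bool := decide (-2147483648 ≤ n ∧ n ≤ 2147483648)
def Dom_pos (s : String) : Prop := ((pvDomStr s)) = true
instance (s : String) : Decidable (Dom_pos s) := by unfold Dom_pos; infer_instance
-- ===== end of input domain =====

-- B builds the full list of visited positions from a delta table, then validates all of them
-- in one scan and returns the last, instead of A's step-update-check loop with early return.

-- ===== PORT A =====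
-- the for-loop over s with state (row, col) and early returns
def posLoop : List Char → Int → Int → Option (Int × Int)
  | [], row, col => some (row, col)
  | c :: rest, row, col =>
    let rc : Int × Int :=
      if c = 'U' then (row - 1, col)
      else if c = 'D' then (row + 1, col)
      else if c = 'L' then (row, col - 1)
      else if c = 'R' then (row, col + 1)
      else (row, col)
    if rc.1 < 0 ∨ 4 ≤ rc.1 then none
    else if rc.2 < 0 ∨ 4 ≤ rc.2 then none
    else posLoop rest rc.1 rc.2

def pos (s : String) : Option (Int × Int) := posLoop s.toList 0 0

-- ===== PORT B =====
def DELTA : PySem.Dict Char (Int × Int) :=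
  PySem.Dict.mk [('U', (-1, 0)), ('D', (1, 0)), ('L', (0, -1)), ('R', (0, 1))]

-- loop body: append pts[-1] + DELTA.get(c, (0,0)) to pts (pts is never empty, so
-- pyGetD pts (-1) (0,0) is exact for pts[-1])
def stepB (pts : List (Int × Int)) (c : Char) : List (Int × Int) :=
  let d := PySem.Dict.getD DELTA c (0, 0)
  let last := PySem.List.pyGetD pts (-1) (0, 0)
  pts ++ [(last.1 + d.1, last.2 + d.2)]

def okB (p : Int × Int) : Bool := decide (0 ≤ p.1 ∧ p.1 < 4 ∧ 0 ≤ p.2 ∧ p.2 < 4)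

def pos_alt (s : String) : Option (Int × Int) :=
  let pts := s.toList.foldl stepB [((0 : Int), (0 : Int))]
  if pts.all okB then PySem.List.pyGet? pts (-1) else none

-- ===== PRECONDITION & SPEC =====
def Spec_pos (s : String) (out : Option (Int × Int)) : Prop := out = pos_alt s
instance (s : String) (out : Option (Int × Int)) : Decidable (Spec_pos s out) := by unfold Spec_pos; infer_instance

-- ===== CLAIM (what is proved, stated in full; the proofs are below) =====
def Claim_equal_pos : Prop := ∀ (s : String), Dom_pos s → Spec_pos s (pos s)

-- ===== LEMMAS AND PROOFS =====

lemma mem_foldl_stepB (cs : List Char) (pts : List (Int × Int)) {p : Int × Int}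
    (hp : p ∈ pts) : p ∈ cs.foldl stepB pts := by
  induction cs generalizing pts with
  | nil => exact hp
  | cons c cs ih => exact ih _ (by simp [stepB, hp])

lemma main_lemma (cs : List Char) (pts : List (Int × Int)) (row col : Int)
    (hne : pts ≠ []) (hlast : PySem.List.pyGetD pts (-1) (0, 0) = (row, col))
    (hall : ∀ p ∈ pts, okB p = true) :
    posLoop cs row col =
      (if (cs.foldl stepB pts).all okB then PySem.List.pyGet? (cs.foldl stepB pts) (-1)
       else none) := by
  induction cs generalizing pts row col with
  | nil =>
    simp only [List.foldl_nil, posLoop]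
    rw [if_pos (List.all_eq_true.mpr hall)]
    rw [PySem.List.pyGet?_neg_one]
    rw [PySem.List.pyGetD_neg_one pts (0,0) hne] at hlast
    rw [List.getLast?_eq_some_getLast hne, hlast]
  | cons c cs ih =>
    simp only [List.foldl_cons, posLoop]
    set p' : Int × Int := (if c = 'U' then ((row - 1 : Int), col)
        else if c = 'D' then (row + 1, col)
        else if c = 'L' then (row, col - 1)
        else if c = 'R' then (row, col + 1)
        else (row, col)) with hp'
    -- the dict lookup agrees with the match statement's deltas
    have hval : PySem.Dict.getD DELTA c (0, 0) =
        (if c = 'U' then ((-1 : Int), (0 : Int)) else if c = 'D' then (1, 0)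
         else if c = 'L' then (0, -1) else if c = 'R' then (0, 1) else (0, 0)) := by
      by_cases h1 : c = 'U'
      · subst h1; decide
      by_cases h2 : c = 'D'
      · subst h2; decide
      by_cases h3 : c = 'L'
      · subst h3; decide
      by_cases h4 : c = 'R'
      · subst h4; decide
      have b1 : ('U' == c) = false := beq_eq_false_iff_ne.mpr (Ne.symm h1)
      have b2 : ('D' == c) = false := beq_eq_false_iff_ne.mpr (Ne.symm h2)
      have b3 : ('L' == c) = false := beq_eq_false_iff_ne.mpr (Ne.symm h3)
      have b4 : ('R' == c) = false := beq_eq_false_iff_ne.mpr (Ne.symm h4)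
      simp [DELTA, PySem.Dict.getD, PySem.Dict.get?, List.find?, h1, h2, h3, h4,
            b1, b2, b3, b4]
    -- hence the appended position is p'
    have hd : stepB pts c = pts ++ [p'] := by
      simp only [stepB, hlast, hval, hp']
      by_cases h1 : c = 'U' <;> by_cases h2 : c = 'D' <;> by_cases h3 : c = 'L' <;>
        by_cases h4 : c = 'R' <;>
        simp [h1, h2, h3, h4] <;> omega
    rw [hd]
    by_cases hok : okB p' = true
    · -- in bounds: A recurses; B's invariant is re-established on pts ++ [p']
      have hrec := ih (pts ++ [p']) p'.1 p'.2 (by simp)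
        (by rw [PySem.List.pyGetD_neg_one_append_singleton pts p' (0,0)])
        (by intro q hq
            rcases List.mem_append.mp hq with h | h
            · exact hall q h
            · simp at h; simpa [h] using hok)
      have hA : (if p'.1 < 0 ∨ 4 ≤ p'.1 then none
          else if p'.2 < 0 ∨ 4 ≤ p'.2 then (none : Option (Int × Int))
          else posLoop cs p'.1 p'.2) = posLoop cs p'.1 p'.2 := by
        simp only [okB, decide_eq_true_eq] at hok
        rw [if_neg (by omega), if_neg (by omega)]
      rw [hA, hrec]
    · -- out of bounds: A returns none; p' ∈ B's final list, so `all` fails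
      have hmem : p' ∈ cs.foldl stepB (pts ++ [p']) :=
        mem_foldl_stepB cs _ (by simp)
      have hnall : (cs.foldl stepB (pts ++ [p'])).all okB = false := by
        rw [List.all_eq_false]
        exact ⟨p', hmem, by simpa using hok⟩
      rw [hnall]
      simp only [Bool.false_eq_true, if_false]
      simp only [okB, decide_eq_true_eq] at hok
      by_cases h1 : p'.1 < 0 ∨ 4 ≤ p'.1
      · rw [if_pos h1]
      · rw [if_neg h1, if_pos (by omega)]

-- ===== VERDICT (by name: the statement is the Claim_ definition above) =====
theorem pos_spec : Claim_equal_pos := by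
  intro s _
  unfold Spec_pos pos pos_alt
  exact main_lemma s.toList [((0 : Int), (0 : Int))] 0 0 (by simp)
    (by rw [PySem.List.pyGetD_neg_one _ _ (by simp)]; rfl) (by intro p hp; simp at hp; simp [hp, okB])
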